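-- pv_equiv track=rewrite | github.com/nayavu/air-conditioner-controller | tools/analyzer.py | measure_pulses
-- ===== SOURCE A (Python) =====
-- def measure_pulses(row, unit_of_time):
--     pulses = []
--     lvl = 1
--     for i in range(1, len(row)):
--         t = row[i]
--         pulses_count = round(t / unit_of_time)
--         pulses.append((pulses_count, lvl))
--         lvl = 0 if lvl == 1 else 1
--     return pulses
-- ===== SOURCE B (Python) =====
-- def measure_pulses(row, unit_of_time):
--     # Pairwise blocking: consume the tail two elements per iteration, emitting a
--     # fixed (level 1, level 0) pair each time; no toggled state and no parity
--     # arithmetic is needed. An odd leftover element gets level 1.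
--     n = len(row)
--     pulses = []
--     i = 1
--     while i + 1 < n:
--         pulses.append((round(row[i] / unit_of_time), 1))
--         pulses.append((round(row[i + 1] / unit_of_time), 0))
--         i += 2
--     if i < n:
--         pulses.append((round(row[i] / unit_of_time), 1))
--     return pulses
-- ===== Notes on version B (the rewrite author's own statement) =====
-- stated objective: alternative
-- what changed: A threads a toggling lvl flag through a per-element loop; B processes the tail in blocks of two, emitting a fixed (count,1),(count,0) pair per iteration (plus a level-1 leftover for an odd tail), so no level state or parity computation exists at all.
import Mathlib
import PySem

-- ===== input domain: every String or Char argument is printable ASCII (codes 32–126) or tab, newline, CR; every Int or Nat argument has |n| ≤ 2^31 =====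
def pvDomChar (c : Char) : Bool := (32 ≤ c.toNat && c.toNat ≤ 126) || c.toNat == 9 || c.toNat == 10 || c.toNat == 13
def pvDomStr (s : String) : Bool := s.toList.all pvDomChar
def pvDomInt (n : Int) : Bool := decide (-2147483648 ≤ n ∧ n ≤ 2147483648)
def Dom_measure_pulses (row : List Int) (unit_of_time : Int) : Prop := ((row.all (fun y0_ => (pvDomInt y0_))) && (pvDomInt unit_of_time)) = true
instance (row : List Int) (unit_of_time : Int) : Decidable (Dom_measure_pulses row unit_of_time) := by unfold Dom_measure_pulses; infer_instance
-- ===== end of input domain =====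

-- B drops A's toggling lvl state: it consumes the tail two elements at a time,
-- emitting a fixed (level 1, level 0) pair per block (objective: alternative).

-- Shared helper: hand-port of Python's built-in round(t / unit_of_time) (nearest, ties to even),
-- computed exactly on rationals; exact w.r.t. CPython's float division for |t|, |u| ≤ 2^31
-- (the float rounding error there is strictly smaller than the distance to a half-integer tie).
def pyRoundDiv (t u : Int) : Int :=
  let q := PySem.Int.floordiv t u
  let r := t - q * u
  let tw := 2 * r
  if (0 < u ∧ tw < u) ∨ (u < 0 ∧ u < tw) then q
  else if (0 < u ∧ u < tw) ∨ (u < 0 ∧ tw < u) then q + 1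
  else if PySem.Int.mod q 2 = 0 then q else q + 1

-- ===== PORT A =====
def measure_pulses (row : List Int) (unit_of_time : Int) : List (Int × Int) :=
  ((PySem.List.pyRange 1 (row.length : Int) 1).foldl
    (fun (st : List (Int × Int) × Int) i =>
      let t := PySem.List.pyGetD row i 0   -- row[i]; i is always in range here
      let pulses_count := pyRoundDiv t unit_of_time
      (st.1 ++ [(pulses_count, st.2)], if st.2 = 1 then 0 else 1))
    ([], 1)).1

-- ===== PORT B =====
-- Source B's while loop advances the index by 2 over row[1:], appending the block
-- (count,1),(count,0) each round and a final (count,1) if one element is left;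
-- transcribed as two-at-a-time structural recursion on the tail of row.
def mp_blocks (u : Int) : List Int → List (Int × Int)
  | [] => []
  | [x] => [(pyRoundDiv x u, 1)]
  | x :: y :: rest => (pyRoundDiv x u, 1) :: (pyRoundDiv y u, 0) :: mp_blocks u rest

def measure_pulses_alt (row : List Int) (unit_of_time : Int) : List (Int × Int) :=
  mp_blocks unit_of_time row.tail

-- ===== PRECONDITION & SPEC =====
-- Pre_ excludes exactly the inputs where Python A raises ZeroDivisionError
-- (unit_of_time = 0 while the loop runs, i.e. len(row) ≥ 2); B raises there too.
def Pre_measure_pulses (row : List Int) (unit_of_time : Int) : Prop :=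
  unit_of_time ≠ 0 ∨ row.length ≤ 1
instance (row : List Int) (unit_of_time : Int) : Decidable (Pre_measure_pulses row unit_of_time) := by unfold Pre_measure_pulses; infer_instance

def pvWitness_measure_pulses : List Int × Int := ([5, 10, 3], 2)

def Spec_measure_pulses (row : List Int) (unit_of_time : Int) (out : List (Int × Int)) : Prop := out = measure_pulses_alt row unit_of_time
instance (row : List Int) (unit_of_time : Int) (out : List (Int × Int)) : Decidable (Spec_measure_pulses row unit_of_time out) := by unfold Spec_measure_pulses; infer_instance

-- ===== CLAIM =====
def Claim_equal_measure_pulses : Prop := ∀ (row : List Int) (unit_of_time : Int), Dom_measure_pulses row unit_of_time → Pre_measure_pulses row unit_of_time → Spec_measure_pulses row unit_of_time (measure_pulses row unit_of_time)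

-- ===== LEMMAS AND PROOFS =====

-- A's stateful toggle loop, run over any tail t from level 1, produces B's blocks.
lemma loopA_eq_blocks (u : Int) : ∀ (t : List Int) (acc : List (Int × Int)),
    (t.foldl
      (fun (st : List (Int × Int) × Int) x =>
        (st.1 ++ [(pyRoundDiv x u, st.2)], if st.2 = 1 then 0 else 1))
      (acc, 1)).1 = acc ++ mp_blocks u t
  | [], acc => by simp [mp_blocks]
  | [x], acc => by simp [mp_blocks]
  | x :: y :: rest, acc => by
    simp only [List.foldl_cons]
    norm_num [loopA_eq_blocks u rest, mp_blocks]

theorem measure_pulses_spec : Claim_equal_measure_pulses := by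
  intro row u _ _
  unfold Spec_measure_pulses measure_pulses measure_pulses_alt
  show (List.foldl
      (fun (st : List (Int × Int) × Int) i =>
        (st.1 ++ [(pyRoundDiv (PySem.List.pyGetD row i 0) u, st.2)],
          if st.2 = 1 then 0 else 1))
      ([], 1) (PySem.List.pyRange 1 (row.length : Int) 1)).1 = _
  rw [PySem.List.foldl_pyRange_pyGetD' (xs := row) (d := (0 : Int))
        (f := fun (st : List (Int × Int) × Int) x =>
          (st.1 ++ [(pyRoundDiv x u, st.2)], if st.2 = 1 then 0 else 1))
        (init := (([] : List (Int × Int)), (1 : Int))) (a := 1) (by omega)]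
  simp only [Int.toNat_one, List.drop_one]
  rw [loopA_eq_blocks u row.tail []]
  simp
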